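-- pv_equiv track=rewrite | github.com/KangMinHyeok/irredicator | utils/utils.py | sumRels
-- ===== SOURCE A (Python) =====
-- def sumRels(rels):
--     result = "none"
--     if len(rels) == 0: return 'not-covered'
--     elif len(rels) == 1: result = rels[0]
--     else:
--         priority = ["self", "same", "sameISP", "customer-provider", "provider", "customer", "peer", "peering", "ddos", "none", "None"]
--
--         for key in priority:
--             if key in rels:
--                 result = key
--                 break
--
--     keyMap = {  "self":"same",
--                 "same":"same",
--                 "sameISP": "sameISP",
--                 "provider":"customer-provider",
--                 "customer": "customer-provider",
--                 "customer-provider": "customer-provider",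
--                 "peer":"peering",
--                 "peering":"peering",
--                 "ddos":"ddos",
--                 "None":"none",
--                 "none":"none"
--             }
--
--     result = keyMap.get(result, "none")
--
--     return result
-- ===== SOURCE B (Python) =====
-- # Rank each priority label once; one pass over rels taking the minimal rank,
-- # then a direct rank -> summary-label table (keyMap pre-applied per rank).
-- _ORDER = {"self": 0, "same": 1, "sameISP": 2, "customer-provider": 3,
--           "provider": 4, "customer": 5, "peer": 6, "peering": 7,
--           "ddos": 8, "none": 9, "None": 10}
-- _OUT = ["same", "same", "sameISP", "customer-provider", "customer-provider",
--         "customer-provider", "peering", "peering", "ddos", "none", "none",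
--         "none"]  # _OUT[11] = default when no known label occurs
--
-- def sumRels(rels):
--     if not rels:
--         return 'not-covered'
--     m = min((_ORDER[r] for r in rels if r in _ORDER), default=len(_ORDER))
--     return _OUT[m]
-- ===== Notes on version B (the rewrite author's own statement) =====
-- stated objective: simpler
-- what changed: Replaces the scan of the fixed priority list with repeated 'key in rels' membership tests (plus a separate len==1 branch and a final keyMap lookup) by a single pass over rels taking the minimal precomputed rank, then one indexed table lookup with keyMap pre-applied per rank.
import Mathlib
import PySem

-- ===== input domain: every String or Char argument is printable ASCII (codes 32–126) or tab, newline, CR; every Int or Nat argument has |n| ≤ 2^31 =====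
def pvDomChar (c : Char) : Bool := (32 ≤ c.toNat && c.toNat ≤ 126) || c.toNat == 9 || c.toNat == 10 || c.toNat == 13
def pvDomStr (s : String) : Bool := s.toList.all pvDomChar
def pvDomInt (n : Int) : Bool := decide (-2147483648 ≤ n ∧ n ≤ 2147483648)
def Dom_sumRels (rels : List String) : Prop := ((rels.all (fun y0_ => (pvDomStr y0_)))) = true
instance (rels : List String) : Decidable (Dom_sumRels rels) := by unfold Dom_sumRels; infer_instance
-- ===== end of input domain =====

-- B replaces A's scan of the fixed priority list (with repeated 'key in rels' tests)
-- by a single pass over rels taking the minimal precomputed rank, then one table lookup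
-- (keyMap pre-applied per rank); objective: simpler.

-- ===== PORT A =====
def pvPriorityA : List String :=
  ["self", "same", "sameISP", "customer-provider", "provider", "customer",
   "peer", "peering", "ddos", "none", "None"]

def pvKeyMapA : PySem.Dict String String :=
  PySem.Dict.ofList
    [("self", "same"), ("same", "same"), ("sameISP", "sameISP"),
     ("provider", "customer-provider"), ("customer", "customer-provider"),
     ("customer-provider", "customer-provider"), ("peer", "peering"),
     ("peering", "peering"), ("ddos", "ddos"), ("None", "none"), ("none", "none")]

-- 'for key in priority: if key in rels: result = key; break'
def pvFirstIn (ks : List String) (rels : List String) (result : String) : String :=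
  match ks with
  | [] => result
  | k :: t => if rels.contains k then k else pvFirstIn t rels result

def sumRels (rels : List String) : String :=
  if rels.length = 0 then "not-covered"
  else
    let result :=
      if rels.length = 1 then PySem.List.pyGetD rels 0 "none"  -- rels[0], in range here
      else pvFirstIn pvPriorityA rels "none"
    pvKeyMapA.getD result "none"

-- ===== PORT B =====
def pvOrderB : PySem.Dict String Int :=
  PySem.Dict.ofList
    [("self", 0), ("same", 1), ("sameISP", 2), ("customer-provider", 3),
     ("provider", 4), ("customer", 5), ("peer", 6), ("peering", 7),
     ("ddos", 8), ("none", 9), ("None", 10)]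

def pvOutB : List String :=
  ["same", "same", "sameISP", "customer-provider", "customer-provider",
   "customer-provider", "peering", "peering", "ddos", "none", "none", "none"]

-- min(( _ORDER[r] for r in rels if r in _ORDER ), default=11) as a fold
def pvStep (acc : Int) (r : String) : Int :=
  match pvOrderB.get? r with
  | some i => min acc i
  | none => acc

def sumRels_alt (rels : List String) : String :=
  if rels = [] then "not-covered"
  else
    let m := rels.foldl pvStep 11
    PySem.List.pyGetD pvOutB m "none"  -- _OUT[m]; 0 ≤ m ≤ 11 < 12 always, default unused

-- ===== PRECONDITION & SPEC =====
def Spec_sumRels (rels : List String) (out : String) : Prop := out = sumRels_alt rels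
instance (rels : List String) (out : String) : Decidable (Spec_sumRels rels out) := by unfold Spec_sumRels; infer_instance

-- ===== CLAIM (what is proved, stated in full; the proofs are below) =====
def Claim_equal_sumRels : Prop := ∀ (rels : List String), Dom_sumRels rels → Spec_sumRels rels (sumRels rels)

-- ===== LEMMAS AND PROOFS =====

-- the (label, rank) pairs of pvOrderB, as a plain list
def pvPairs : List (String × Int) :=
  [("self", 0), ("same", 1), ("sameISP", 2), ("customer-provider", 3),
   ("provider", 4), ("customer", 5), ("peer", 6), ("peering", 7),
   ("ddos", 8), ("none", 9), ("None", 10)]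

-- rank of the first pair whose label occurs in rels (11 if none)
def pvChain (ps : List (String × Int)) (rels : List String) : Int :=
  match ps with
  | [] => 11
  | p :: t => if p.1 ∈ rels then p.2 else pvChain t rels

lemma pvOrderB_mk : pvOrderB = PySem.Dict.mk pvPairs := by rfl

lemma pvKeyMapA_mk : pvKeyMapA = PySem.Dict.mk
    [("self", "same"), ("same", "same"), ("sameISP", "sameISP"),
     ("provider", "customer-provider"), ("customer", "customer-provider"),
     ("customer-provider", "customer-provider"), ("peer", "peering"),
     ("peering", "peering"), ("ddos", "ddos"), ("None", "none"), ("none", "none")] := by rfl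

lemma pvStep_some (a : Int) (r : String) (i : Int) (h : pvOrderB.get? r = some i) :
    pvStep a r = min a i := by simp only [pvStep, h]

lemma pvStep_none (a : Int) (r : String) (h : pvOrderB.get? r = none) :
    pvStep a r = a := by simp only [pvStep, h]

lemma pvChain_ub (ps : List (String × Int)) (rels : List String)
    (h : ∀ p ∈ ps, p.2 ≤ 11) : pvChain ps rels ≤ 11 := by
  induction ps with
  | nil => simp [pvChain]
  | cons p t ih =>
    simp only [pvChain]
    split_ifs with hp
    · exact h p (List.mem_cons_self ..)
    · exact ih fun q hq => h q (List.mem_cons_of_mem _ hq)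

lemma pvChain_lb (ps : List (String × Int)) (rels : List String) (c : Int)
    (h : ∀ p ∈ ps, c ≤ p.2) (hc : c ≤ 11) : c ≤ pvChain ps rels := by
  induction ps with
  | nil => simpa [pvChain]
  | cons p t ih =>
    simp only [pvChain]
    split_ifs with hp
    · exact h p (List.mem_cons_self ..)
    · exact ih fun q hq => h q (List.mem_cons_of_mem _ hq)

lemma pvChain_cons_notin (ps : List (String × Int)) (r : String) (t : List String)
    (h : ∀ p ∈ ps, p.1 ≠ r) : pvChain ps (r :: t) = pvChain ps t := by
  induction ps with
  | nil => rfl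
  | cons p q ih =>
    have hf : (p.1 = r) = False := eq_false (h p (List.mem_cons_self ..))
    show (if p.1 ∈ r :: t then p.2 else pvChain q (r :: t))
        = (if p.1 ∈ t then p.2 else pvChain q t)
    simp only [List.mem_cons, hf, false_or]
    split_ifs with h1
    · rfl
    · exact ih fun u hu => h u (List.mem_cons_of_mem _ hu)

lemma pvChain_cons_in (ps : List (String × Int)) (r : String) (i : Int) (t : List String)
    (hsort : ps.Pairwise (fun p q => p.2 < q.2)) (hub : ∀ p ∈ ps, p.2 ≤ 11)
    (hnd : (ps.map Prod.fst).Nodup) (hmem : (r, i) ∈ ps) :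
    pvChain ps (r :: t) = min i (pvChain ps t) := by
  induction ps with
  | nil => cases hmem
  | cons p q ih =>
    rcases List.mem_cons.mp hmem with hp | hq
    · subst hp
      have hlb : i ≤ pvChain q t := by
        refine pvChain_lb q t i (fun u hu => le_of_lt ?_) (hub _ (List.mem_cons_self ..))
        exact (List.pairwise_cons.mp hsort).1 u hu
      show (if r ∈ r :: t then i else pvChain q (r :: t))
          = min i (if r ∈ t then i else pvChain q t)
      rw [if_pos (List.mem_cons_self ..)]
      split_ifs with h1 <;> omega
    · have hpr : p.1 ≠ r := by
        intro he
        have : r ∈ q.map Prod.fst := List.mem_map.mpr ⟨(r, i), hq, rfl⟩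
        rw [← he] at this
        exact (List.nodup_cons.mp hnd).1 this
      have hlt : p.2 < i := (List.pairwise_cons.mp hsort).1 (r, i) hq
      have hf : (p.1 = r) = False := eq_false hpr
      show (if p.1 ∈ r :: t then p.2 else pvChain q (r :: t))
          = min i (if p.1 ∈ t then p.2 else pvChain q t)
      simp only [List.mem_cons, hf, false_or]
      rw [ih (List.pairwise_cons.mp hsort).2 (fun u hu => hub u (List.mem_cons_of_mem _ hu))
        (List.nodup_cons.mp hnd).2 hq]
      split_ifs with h1
      · omega
      · rfl

lemma pvChain_le (rels : List String) : pvChain pvPairs rels ≤ 11 :=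
  pvChain_ub _ _ (by decide)

lemma pvFold_eq_chain (rels : List String) : ∀ acc : Int, acc ≤ 11 →
    rels.foldl pvStep acc = min acc (pvChain pvPairs rels) := by
  induction rels with
  | nil =>
    intro acc h
    have h11 : pvChain pvPairs ([] : List String) = 11 := by decide
    simp only [List.foldl_nil]
    omega
  | cons r t ih =>
    intro acc hacc
    rw [List.foldl_cons]
    cases hg : pvOrderB.get? r with
    | some i =>
      have hmem : (r, i) ∈ pvPairs := by
        have h1 := PySem.Dict.mem_items_of_get?_eq_some pvOrderB hg
        rw [pvOrderB_mk] at h1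
        exact h1
      rw [pvStep_some acc r i hg, ih _ (by omega),
        pvChain_cons_in pvPairs r i t (by decide) (by decide) (by decide) hmem]
      omega
    | none =>
      have hk : ∀ p ∈ pvPairs, p.1 ≠ r := by
        intro p hp he
        have hnk : r ∉ pvOrderB.keys := by
          rw [← PySem.Dict.get?_eq_none_iff_not_mem_keys]
          exact hg
        apply hnk
        rw [pvOrderB_mk]
        show r ∈ pvPairs.map Prod.fst
        exact List.mem_map.mpr ⟨p, hp, he⟩
      rw [pvStep_none acc r hg, ih _ hacc, pvChain_cons_notin pvPairs r t hk]

set_option maxHeartbeats 1600000 in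
-- the many-element branch: A's priority scan + keyMap equals the rank table
lemma pvMulti_bridge (rels : List String) :
    pvKeyMapA.getD (pvFirstIn pvPriorityA rels "none") "none"
      = PySem.List.pyGetD pvOutB (pvChain pvPairs rels) "none" := by
  rw [pvKeyMapA_mk]
  simp only [pvPriorityA, pvPairs, pvFirstIn, pvChain, List.contains_eq_mem, decide_eq_true_eq]
  split_ifs <;> decide

set_option maxHeartbeats 1600000 in
-- the one-element branch: keyMap.get(x, "none") equals the rank table on [x]
lemma pvSingle_bridge (x : String) :
    pvKeyMapA.getD x "none" = PySem.List.pyGetD pvOutB (pvChain pvPairs [x]) "none" := by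
  rw [pvKeyMapA_mk]
  simp only [pvPairs, pvChain, List.mem_singleton]
  split_ifs with h0 h1 h2 h3 h4 h5 h6 h7 h8 h9 h10
  · rw [← h0]; decide
  · rw [← h1]; decide
  · rw [← h2]; decide
  · rw [← h3]; decide
  · rw [← h4]; decide
  · rw [← h5]; decide
  · rw [← h6]; decide
  · rw [← h7]; decide
  · rw [← h8]; decide
  · rw [← h9]; decide
  · rw [← h10]; decide
  · have hk : (PySem.Dict.mk
        [("self", "same"), ("same", "same"), ("sameISP", "sameISP"),
         ("provider", "customer-provider"), ("customer", "customer-provider"),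
         ("customer-provider", "customer-provider"), ("peer", "peering"),
         ("peering", "peering"), ("ddos", "ddos"), ("None", "none"),
         ("none", "none")]).getD x "none" = "none" := by
      simp [PySem.Dict.getD_eq_get?_getD, beq_iff_eq,
        h0, h1, h2, h3, h4, h5, h6, h7, h8, h9, h10, PySem.Dict.get?]
    rw [hk]; decide

-- ===== VERDICT (by name: the statement is the Claim_ definition above) =====
theorem sumRels_spec : Claim_equal_sumRels := by
  intro rels _
  unfold Spec_sumRels sumRels sumRels_alt
  cases rels with
  | nil => decide
  | cons x t =>
    have hne : (x :: t : List String) ≠ [] := by simp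
    have hfold : (x :: t).foldl pvStep 11 = pvChain pvPairs (x :: t) := by
      rw [pvFold_eq_chain _ 11 le_rfl]
      have := pvChain_le (x :: t)
      omega
    simp only [if_neg hne, hfold]
    cases t with
    | nil =>
      simp only [List.length_cons, List.length_nil]
      norm_num
      exact pvSingle_bridge x
    | cons y u =>
      have hlen0 : (x :: y :: u).length = 0 ↔ False := by simp
      have hlen1 : (x :: y :: u).length = 1 ↔ False := by simp
      simp only [hlen0, hlen1, if_false]
      exact pvMulti_bridge (x :: y :: u)
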